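-- pv_equiv track=rewrite | github.com/akashsreedhar/AI-PDF-BOT | backend/utils/web_search.py | _agreement_score
-- ===== SOURCE A (Python) =====
-- from typing import Dict, List, Optional
--
-- def _agreement_score(index: int, keyword_sets: List[set[str]]) -> int:
--     # Reward results that share core terms with multiple independent results.
--     overlaps = 0
--     current = keyword_sets[index]
--     if not current:
--         return 0
--     for i, other in enumerate(keyword_sets):
--         if i == index or not other:
--             continue
--         if len(current.intersection(other)) >= 3:
--             overlaps += 1
--     if overlaps >= 3:
--         return 30
--     if overlaps >= 2:
--         return 20
--     if overlaps >= 1: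
--         return 10
--     return 0
-- ===== SOURCE B (Python) =====
-- def _agreement_score(index, keyword_sets):
--     current = keyword_sets[index]
--     if not current:
--         return 0
--     tally = {}
--     for term in current:
--         for i, other in enumerate(keyword_sets):
--             if i == index:
--                 continue
--             if term in other:
--                 tally[i] = tally.get(i, 0) + 1
--     overlaps = sum(1 for i in range(len(keyword_sets)) if tally.get(i, 0) >= 3)
--     return min(overlaps, 3) * 10
-- ===== Notes on version B (the rewrite author's own statement) =====
-- stated objective: alternative
-- what changed: Replaces the pairwise set-intersection scan with a term-outer tally: for each term of the current set a pass over the other sets increments a per-index counter dict, overlaps is the number of indices whose tally reaches 3, and the bucketed if-chain becomes min(overlaps,3)*10.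
import Mathlib
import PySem

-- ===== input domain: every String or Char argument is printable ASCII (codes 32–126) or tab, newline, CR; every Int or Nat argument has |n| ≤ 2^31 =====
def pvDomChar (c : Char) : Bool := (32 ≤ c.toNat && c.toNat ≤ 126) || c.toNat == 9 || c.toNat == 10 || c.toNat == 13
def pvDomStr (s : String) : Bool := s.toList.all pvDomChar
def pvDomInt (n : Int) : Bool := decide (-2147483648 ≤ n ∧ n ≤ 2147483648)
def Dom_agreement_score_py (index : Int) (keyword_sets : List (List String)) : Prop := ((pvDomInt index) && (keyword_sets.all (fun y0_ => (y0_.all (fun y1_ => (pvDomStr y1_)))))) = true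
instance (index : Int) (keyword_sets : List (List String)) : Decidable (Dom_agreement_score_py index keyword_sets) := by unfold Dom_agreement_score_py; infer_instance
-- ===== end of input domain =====

-- B replaces A's pairwise set-intersection scan by a term-outer tally dict counted afterwards (alternative decomposition, same cost).
-- Each inner List String stands for a Python set: membership, intersection size and emptiness are what the ports use it for.

-- ===== PORT A =====
def agreement_score_py (index : Int) (keyword_sets : List (List String)) : Int :=
  match PySem.List.pyGet? keyword_sets index with
  | none => 0  -- IndexError in Python; excluded by Pre_
  | some current =>
    if current.isEmpty then 0
    else
      let overlaps : Int := (PySem.List.enumerate keyword_sets).foldl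
        (fun overlaps p =>
          if p.1 = index ∨ p.2.isEmpty then overlaps
          else if 3 ≤ PySem.Set.len (PySem.Set.inter (PySem.Set.ofList current) p.2) then overlaps + 1
          else overlaps) 0
      if 3 ≤ overlaps then 30
      else if 2 ≤ overlaps then 20
      else if 1 ≤ overlaps then 10
      else 0

-- ===== PORT B =====
def agreement_score_py_alt (index : Int) (keyword_sets : List (List String)) : Int :=
  match PySem.List.pyGet? keyword_sets index with
  | none => 0  -- IndexError in Python; excluded by Pre_
  | some current =>
    if current.isEmpty then 0
    else
      -- for term in current: … (the tally is independent of the set's iteration order)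
      let tally : PySem.Dict Int Int := (PySem.Set.ofList current).foldl
        (fun d term => (PySem.List.enumerate keyword_sets).foldl
          (fun d p =>
            if p.1 = index then d
            else if p.2.contains term then PySem.Dict.modify d p.1 0 (· + 1)
            else d) d)
        PySem.Dict.empty
      let overlaps : Int := (PySem.List.pyRange 0 (PySem.List.len keyword_sets) 1).foldl
        (fun acc i => if 3 ≤ PySem.Dict.getD tally i 0 then acc + 1 else acc) 0
      min overlaps 3 * 10

-- ===== PRECONDITION & SPEC =====
-- Pre_: index must be a valid Python index into keyword_sets (A raises IndexError otherwise).
def Pre_agreement_score_py (index : Int) (keyword_sets : List (List String)) : Prop :=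
  PySem.Raise.InRange keyword_sets.length index
instance (index : Int) (keyword_sets : List (List String)) : Decidable (Pre_agreement_score_py index keyword_sets) := by unfold Pre_agreement_score_py; infer_instance

def pvWitness_agreement_score_py : Int × List (List String) :=
  (0, [["alpha", "beta", "gamma"], ["alpha", "beta", "gamma", "delta"]])

def Spec_agreement_score_py (index : Int) (keyword_sets : List (List String)) (out : Int) : Prop := out = agreement_score_py_alt index keyword_sets
instance (index : Int) (keyword_sets : List (List String)) (out : Int) : Decidable (Spec_agreement_score_py index keyword_sets out) := by unfold Spec_agreement_score_py; infer_instance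

-- ===== CLAIM (what is proved, stated in full; the proofs are below) =====
def Claim_equal_agreement_score_py : Prop := ∀ (index : Int) (keyword_sets : List (List String)), Dom_agreement_score_py index keyword_sets → Pre_agreement_score_py index keyword_sets → Spec_agreement_score_py index keyword_sets (agreement_score_py index keyword_sets)

-- ===== LEMMAS AND PROOFS =====

-- One inner pass of B (a fixed term) adds to key j the number of enumerate pairs hitting j.
theorem pv_inner_getD (index : Int) (term : String) (l : List (Int × List String))
    (d : PySem.Dict Int Int) (j : Int) :
    PySem.Dict.getD (l.foldl (fun d p =>
        if p.1 = index then d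
        else if p.2.contains term then PySem.Dict.modify d p.1 0 (· + 1)
        else d) d) j 0
      = PySem.Dict.getD d j 0
        + (l.countP (fun p => !(p.1 == index) && (p.1 == j) && p.2.contains term) : Int) := by
  induction l generalizing d with
  | nil => simp
  | cons p l ih =>
    simp only [List.foldl_cons, List.countP_cons, ih]
    have hstep : PySem.Dict.getD
        (if p.1 = index then d else if p.2.contains term then PySem.Dict.modify d p.1 0 (· + 1) else d) j 0
        = PySem.Dict.getD d j 0
          + (if (!(p.1 == index) && (p.1 == j) && p.2.contains term) = true then (1:Int) else 0) := by
      by_cases h1 : p.1 = index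
      · simp [h1]
      · by_cases hc : p.2.contains term
        · by_cases hj : p.1 = j
          · subst hj
            rw [if_neg h1, if_pos hc, PySem.Dict.getD_modify]
            simp only [BEq.rfl, Bool.and_true]
            simp [h1]
            exact List.mem_of_elem_eq_true hc
          · rw [if_neg h1, if_pos hc, PySem.Dict.getD_modify,
              if_neg (fun h : j = p.1 => hj h.symm)]
            simp [hj]
        · rw [if_neg h1, if_neg hc]
          have : term ∉ p.2 := fun hm => hc (List.elem_eq_true_of_mem hm)
          simp [this]
    rw [hstep]
    split_ifs <;> push_cast <;> omega

-- B's tally at key j, for the full outer fold over the terms.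
theorem pv_tally_getD (index : Int) (ks : List (List String)) (ts : List String)
    (d : PySem.Dict Int Int) (j : Int) :
    PySem.Dict.getD (ts.foldl (fun d term => (PySem.List.enumerate ks).foldl
        (fun d p =>
          if p.1 = index then d
          else if p.2.contains term then PySem.Dict.modify d p.1 0 (· + 1)
          else d) d) d) j 0
      = PySem.Dict.getD d j 0
        + ((ts.map (fun term => ((PySem.List.enumerate ks).countP
            (fun p => !(p.1 == index) && (p.1 == j) && p.2.contains term) : Int))).sum) := by
  induction ts generalizing d with
  | nil => simp
  | cons t ts ih =>
    simp only [List.foldl_cons, List.map_cons, List.sum_cons]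
    rw [ih, pv_inner_getD]
    ring

-- Counting over a Nodup list with a predicate that pins the element down to j.
theorem pv_countP_single (j : Int) (q : Int → Bool) (himp : ∀ i, q i = true → i = j) :
    ∀ (l : List Int), l.Nodup → j ∈ l → l.countP q = if q j then 1 else 0 := by
  intro l
  induction l with
  | nil => intro _ hj; cases hj
  | cons a l ih =>
    intro hnd hj
    rcases List.nodup_cons.mp hnd with ⟨ha, hnd'⟩
    rw [List.countP_cons]
    rcases List.mem_cons.mp hj with h | h
    · subst h
      have hzero : l.countP q = 0 :=
        List.countP_eq_zero.mpr (fun i hi hq => ha ((himp i hq) ▸ hi))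
      rw [hzero]
      by_cases hq : q j <;> simp [hq]
    · have hqa : q a = false := by
        by_contra hc
        have : a = j := himp a (by simpa using hc)
        exact ha (this ▸ h)
      rw [ih hnd' h, hqa]
      simp

-- The tally's value at an in-range key j, fully evaluated.
theorem pv_tally_eval (index : Int) (ks : List (List String)) (ts : List String) (j : Int)
    (hj : j ∈ PySem.List.pyRange 0 (PySem.List.len ks)) :
    PySem.Dict.getD (ts.foldl (fun d term => (PySem.List.enumerate ks).foldl
        (fun d p =>
          if p.1 = index then d
          else if p.2.contains term then PySem.Dict.modify d p.1 0 (· + 1)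
          else d) d) PySem.Dict.empty) j 0
      = if j = index then 0
        else (ts.countP (fun t => (PySem.List.pyGetD ks j []).contains t) : Int) := by
  rw [pv_tally_getD, PySem.Dict.getD_empty]
  have hterm : ∀ t : String, ((PySem.List.enumerate ks).countP
      (fun p => !(p.1 == index) && (p.1 == j) && p.2.contains t))
      = if (!(j == index) && (PySem.List.pyGetD ks j []).contains t) then 1 else 0 := by
    intro t
    rw [PySem.List.enumerate_eq_map_pyRange ks [], List.countP_map]
    rw [pv_countP_single j _
      (fun i hi => by
        have := (Bool.and_eq_true _ _).mp hi
        have h2 := (Bool.and_eq_true _ _).mp this.1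
        exact beq_iff_eq.mp h2.2)
      _ (PySem.List.nodup_pyRange_one 0 _) hj]
    simp
  rw [List.map_congr_left (fun t _ => congrArg (fun n : Nat => (n : Int)) (hterm t))]
  by_cases hji : j = index
  · simp [hji]
  · have hne : (j == index) = false := by simp [hji]
    simp only [hne, Bool.not_false, Bool.true_and]
    rw [if_neg hji]
    simp only [Nat.cast_ite, Nat.cast_one, Nat.cast_zero]
    rw [PySem.List.sum_map_ite_one_zero]
    ring

-- A's bucketed if-chain is B's min(overlaps,3)*10 for nonnegative counts.
theorem pv_bucket (o : Int) (h : 0 ≤ o) :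
    (if 3 ≤ o then (30:Int) else if 2 ≤ o then 20 else if 1 ≤ o then 10 else 0) = min o 3 * 10 := by
  by_cases h3 : 3 ≤ o
  · rw [min_eq_right h3]
    simp [h3]
  · rw [min_eq_left (by omega : o ≤ 3)]
    split_ifs <;> omega

-- A's accumulating loop as a count over the enumerate pairs.
theorem pv_foldA_count (index : Int) (S : List String) (l : List (Int × List String)) (a : Int) :
    l.foldl (fun overlaps p =>
        if p.1 = index ∨ p.2.isEmpty then overlaps
        else if 3 ≤ PySem.Set.len (PySem.Set.inter S p.2) then overlaps + 1
        else overlaps) a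
      = a + (l.countP (fun p => !((p.1 == index) || p.2.isEmpty)
          && decide (3 ≤ PySem.Set.len (PySem.Set.inter S p.2))) : Int) := by
  rw [show (fun (overlaps : Int) (p : Int × List String) =>
        if p.1 = index ∨ p.2.isEmpty then overlaps
        else if 3 ≤ PySem.Set.len (PySem.Set.inter S p.2) then overlaps + 1
        else overlaps)
      = (fun overlaps p => if (!((p.1 == index) || p.2.isEmpty)
          && decide (3 ≤ PySem.Set.len (PySem.Set.inter S p.2))) = true
          then overlaps + 1 else overlaps) by
    funext overlaps p
    by_cases h1 : p.1 = index ∨ p.2.isEmpty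
    · rcases h1 with h | h <;> simp [h]
    · rcases not_or.mp h1 with ⟨ha, hb⟩
      simp [ha, hb]]
  exact PySem.List.foldl_count_if _ l a

-- B's counting loop over the index range as a count.
theorem pv_foldB_count (f : Int → Int) (l : List Int) (a : Int) :
    l.foldl (fun acc i => if 3 ≤ f i then acc + 1 else acc) a
      = a + (l.countP (fun i => decide (3 ≤ f i)) : Int) := by
  rw [show (fun (acc i : Int) => if 3 ≤ f i then acc + 1 else acc)
      = (fun acc i => if decide (3 ≤ f i) = true then acc + 1 else acc) by
    funext acc i; simp]
  exact PySem.List.foldl_count_if _ l a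

-- ===== VERDICT (by name: the statement is the Claim_ definition above) =====
theorem agreement_score_py_spec : Claim_equal_agreement_score_py := by
  intro index ks _ hpre
  unfold Spec_agreement_score_py agreement_score_py agreement_score_py_alt
  cases hget : PySem.List.pyGet? ks index with
  | none =>
    exact absurd hpre ((PySem.List.pyGet?_eq_none_iff ks index).mp hget)
  | some cur =>
    by_cases hemp : cur.isEmpty
    · simp [hemp]
    · simp only [hemp, Bool.false_eq_true, if_false]
      rw [pv_foldA_count, pv_foldB_count, zero_add, zero_add,
        pv_bucket _ (Int.natCast_nonneg _)]
      congr 2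
      norm_cast
      conv_lhs => rw [PySem.List.enumerate_eq_map_pyRange ks [], List.countP_map]
      apply List.countP_congr
      intro j hjmem
      rw [Function.comp_apply, pv_tally_eval index ks (PySem.Set.ofList cur) j hjmem]
      by_cases hji : j = index
      · simp [hji]
      · by_cases hbe : (PySem.List.pyGetD ks j []).isEmpty
        · have hnil : PySem.List.pyGetD ks j [] = [] := List.isEmpty_iff.mp hbe
          simp [hji, hnil]
        · simp [hji, hbe, PySem.Set.len, PySem.Set.inter, List.countP_eq_length_filter]
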